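-- pv_equiv track=rewrite | github.com/RamRojith/mock-interview- | interview_core/ai_service.py | _determine_role_category
-- ===== SOURCE A (Python) =====
-- def _determine_role_category(topic):
--     """Determine the category of the role for specialized handling"""
--     topic_lower = topic.lower()
--
--     if any(kw in topic_lower for kw in ['python', 'java', 'c++', 'javascript', 'developer', 'programmer', 'software engineer']):
--         return "Software Development"
--     elif any(kw in topic_lower for kw in ['data scientist', 'data analyst', 'machine learning', 'ai', 'ml']):
--         return "Data Science & Analytics"
--     elif any(kw in topic_lower for kw in ['web', 'frontend', 'backend', 'fullstack', 'react', 'angular', 'node']):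
--         return "Web Development"
--     elif any(kw in topic_lower for kw in ['devops', 'cloud', 'aws', 'azure', 'kubernetes', 'docker']):
--         return "DevOps & Cloud"
--     elif any(kw in topic_lower for kw in ['qa', 'test', 'quality assurance', 'automation']):
--         return "Quality Assurance"
--     elif any(kw in topic_lower for kw in ['mobile', 'android', 'ios', 'flutter', 'react native']):
--         return "Mobile Development"
--     elif any(kw in topic_lower for kw in ['database', 'sql', 'dba', 'mongodb', 'postgresql']):
--         return "Database Administration"
--     elif any(kw in topic_lower for kw in ['security', 'cybersecurity', 'penetration', 'ethical hacking']):
--         return "Cybersecurity"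
--     elif any(kw in topic_lower for kw in ['ui', 'ux', 'design', 'graphic']):
--         return "UI/UX Design"
--     elif any(kw in topic_lower for kw in ['project manager', 'scrum', 'agile', 'product manager']):
--         return "Project Management"
--     elif any(kw in topic_lower for kw in ['business analyst', 'ba', 'requirements']):
--         return "Business Analysis"
--     elif any(kw in topic_lower for kw in ['network', 'cisco', 'routing', 'switching']):
--         return "Network Engineering"
--     else:
--         return "General Technical"
-- ===== SOURCE B (Python) =====
-- # B: no elif chain and no per-category any() scan.  One flat pass over every
-- # (keyword, priority) pair keeps the MINIMUM priority of any matching keyword;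
-- # the answer is the name at that priority (or the default if nothing matched).
-- _CATEGORY_NAMES = ['Software Development', 'Data Science & Analytics', 'Web Development', 'DevOps & Cloud', 'Quality Assurance', 'Mobile Development', 'Database Administration', 'Cybersecurity', 'UI/UX Design', 'Project Management', 'Business Analysis', 'Network Engineering']
--
-- _FLAT_KEYWORDS = [
--     ('python', 0), ('java', 0), ('c++', 0), ('javascript', 0), ('developer', 0),
--     ('programmer', 0), ('software engineer', 0),
--     ('data scientist', 1), ('data analyst', 1), ('machine learning', 1), ('ai', 1), ('ml', 1),
--     ('web', 2), ('frontend', 2), ('backend', 2), ('fullstack', 2), ('react', 2),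
--     ('angular', 2), ('node', 2),
--     ('devops', 3), ('cloud', 3), ('aws', 3), ('azure', 3), ('kubernetes', 3), ('docker', 3),
--     ('qa', 4), ('test', 4), ('quality assurance', 4), ('automation', 4),
--     ('mobile', 5), ('android', 5), ('ios', 5), ('flutter', 5), ('react native', 5),
--     ('database', 6), ('sql', 6), ('dba', 6), ('mongodb', 6), ('postgresql', 6),
--     ('security', 7), ('cybersecurity', 7), ('penetration', 7), ('ethical hacking', 7),
--     ('ui', 8), ('ux', 8), ('design', 8), ('graphic', 8),
--     ('project manager', 9), ('scrum', 9), ('agile', 9), ('product manager', 9),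
--     ('business analyst', 10), ('ba', 10), ('requirements', 10),
--     ('network', 11), ('cisco', 11), ('routing', 11), ('switching', 11),
-- ]
--
-- def _determine_role_category(topic):
--     topic_lower = topic.lower()
--     best = len(_CATEGORY_NAMES)
--     for kw, idx in _FLAT_KEYWORDS:
--         if idx < best and kw in topic_lower:
--             best = idx
--     return _CATEGORY_NAMES[best] if best < len(_CATEGORY_NAMES) else "General Technical"
-- ===== Notes on version B (the rewrite author's own statement) =====
-- stated objective: alternative
-- what changed: Replaced the short-circuiting elif chain of per-category any() scans by a single non-short-circuiting pass over a flat (keyword, priority) list that keeps the minimum matching priority, then indexes the category-name list once.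
import Mathlib
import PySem

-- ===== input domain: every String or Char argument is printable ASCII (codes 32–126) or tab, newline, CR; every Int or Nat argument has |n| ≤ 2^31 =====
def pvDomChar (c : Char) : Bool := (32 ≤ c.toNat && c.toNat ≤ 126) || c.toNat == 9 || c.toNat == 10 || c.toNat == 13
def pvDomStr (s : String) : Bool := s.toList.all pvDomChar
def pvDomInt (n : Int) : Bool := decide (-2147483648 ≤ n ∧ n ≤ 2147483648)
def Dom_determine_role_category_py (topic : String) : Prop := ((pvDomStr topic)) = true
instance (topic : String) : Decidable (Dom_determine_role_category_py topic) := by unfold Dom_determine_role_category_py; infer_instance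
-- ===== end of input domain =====

-- B replaces A's short-circuiting elif chain by one flat pass over (keyword, priority)
-- pairs keeping the minimum matching priority; same return value, alternative algorithm.

-- ===== PORT A =====
def determine_role_category_py (topic : String) : String :=
  let topic_lower := PySem.Str.lower topic
  if ["python", "java", "c++", "javascript", "developer", "programmer", "software engineer"].any (fun kw => PySem.Str.isIn kw topic_lower) then "Software Development"
  else if ["data scientist", "data analyst", "machine learning", "ai", "ml"].any (fun kw => PySem.Str.isIn kw topic_lower) then "Data Science & Analytics"
  else if ["web", "frontend", "backend", "fullstack", "react", "angular", "node"].any (fun kw => PySem.Str.isIn kw topic_lower) then "Web Development"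
  else if ["devops", "cloud", "aws", "azure", "kubernetes", "docker"].any (fun kw => PySem.Str.isIn kw topic_lower) then "DevOps & Cloud"
  else if ["qa", "test", "quality assurance", "automation"].any (fun kw => PySem.Str.isIn kw topic_lower) then "Quality Assurance"
  else if ["mobile", "android", "ios", "flutter", "react native"].any (fun kw => PySem.Str.isIn kw topic_lower) then "Mobile Development"
  else if ["database", "sql", "dba", "mongodb", "postgresql"].any (fun kw => PySem.Str.isIn kw topic_lower) then "Database Administration"
  else if ["security", "cybersecurity", "penetration", "ethical hacking"].any (fun kw => PySem.Str.isIn kw topic_lower) then "Cybersecurity"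
  else if ["ui", "ux", "design", "graphic"].any (fun kw => PySem.Str.isIn kw topic_lower) then "UI/UX Design"
  else if ["project manager", "scrum", "agile", "product manager"].any (fun kw => PySem.Str.isIn kw topic_lower) then "Project Management"
  else if ["business analyst", "ba", "requirements"].any (fun kw => PySem.Str.isIn kw topic_lower) then "Business Analysis"
  else if ["network", "cisco", "routing", "switching"].any (fun kw => PySem.Str.isIn kw topic_lower) then "Network Engineering"
  else "General Technical"

-- ===== PORT B =====
-- Source B's _CATEGORY_NAMES
def pvCategoryNames : List String :=
  ["Software Development", "Data Science & Analytics", "Web Development", "DevOps & Cloud", "Quality Assurance", "Mobile Development", "Database Administration", "Cybersecurity", "UI/UX Design", "Project Management", "Business Analysis", "Network Engineering"]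

-- Source B's _FLAT_KEYWORDS: every keyword paired with its category's priority
def pvFlatKeywords : List (String × Nat) :=
  [("python", 0), ("java", 0), ("c++", 0), ("javascript", 0), ("developer", 0), ("programmer", 0), ("software engineer", 0), ("data scientist", 1), ("data analyst", 1), ("machine learning", 1), ("ai", 1), ("ml", 1), ("web", 2), ("frontend", 2), ("backend", 2), ("fullstack", 2), ("react", 2), ("angular", 2), ("node", 2), ("devops", 3), ("cloud", 3), ("aws", 3), ("azure", 3), ("kubernetes", 3), ("docker", 3), ("qa", 4), ("test", 4), ("quality assurance", 4), ("automation", 4), ("mobile", 5), ("android", 5), ("ios", 5), ("flutter", 5), ("react native", 5), ("database", 6), ("sql", 6), ("dba", 6), ("mongodb", 6), ("postgresql", 6), ("security", 7), ("cybersecurity", 7), ("penetration", 7), ("ethical hacking", 7), ("ui", 8), ("ux", 8), ("design", 8), ("graphic", 8), ("project manager", 9), ("scrum", 9), ("agile", 9), ("product manager", 9), ("business analyst", 10), ("ba", 10), ("requirements", 10), ("network", 11), ("cisco", 11), ("routing", 11), ("switching", 11)]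

-- the loop body of Source B's for-loop
def pvStep (tl : String) (best : Nat) (p : String × Nat) : Nat :=
  if p.2 < best && PySem.Str.isIn p.1 tl then p.2 else best

def determine_role_category_py_alt (topic : String) : String :=
  let topic_lower := PySem.Str.lower topic
  let best := pvFlatKeywords.foldl (pvStep topic_lower) pvCategoryNames.length
  if best < pvCategoryNames.length then pvCategoryNames.getD best "General Technical"
  else "General Technical"

-- ===== PRECONDITION & SPEC =====
def Spec_determine_role_category_py (topic : String) (out : String) : Prop := out = determine_role_category_py_alt topic
instance (topic : String) (out : String) : Decidable (Spec_determine_role_category_py topic out) := by unfold Spec_determine_role_category_py; infer_instance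

-- ===== CLAIM =====
def Claim_equal_determine_role_category_py : Prop := ∀ (topic : String), Dom_determine_role_category_py topic → Spec_determine_role_category_py topic (determine_role_category_py topic)

-- ===== LEMMAS AND PROOFS =====

-- the grouped table (proof-side view of the data; mirrors A's branch order)
def pvTable : List (String × List String) :=
  [ ("Software Development", ["python", "java", "c++", "javascript", "developer", "programmer", "software engineer"]),
    ("Data Science & Analytics", ["data scientist", "data analyst", "machine learning", "ai", "ml"]),
    ("Web Development", ["web", "frontend", "backend", "fullstack", "react", "angular", "node"]),
    ("DevOps & Cloud", ["devops", "cloud", "aws", "azure", "kubernetes", "docker"]),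
    ("Quality Assurance", ["qa", "test", "quality assurance", "automation"]),
    ("Mobile Development", ["mobile", "android", "ios", "flutter", "react native"]),
    ("Database Administration", ["database", "sql", "dba", "mongodb", "postgresql"]),
    ("Cybersecurity", ["security", "cybersecurity", "penetration", "ethical hacking"]),
    ("UI/UX Design", ["ui", "ux", "design", "graphic"]),
    ("Project Management", ["project manager", "scrum", "agile", "product manager"]),
    ("Business Analysis", ["business analyst", "ba", "requirements"]),
    ("Network Engineering", ["network", "cisco", "routing", "switching"]) ]

def pvBlock (i : Nat) (kws : List String) : List (String × Nat) := kws.map (fun kw => (kw, i))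

def pvFlat (k : Nat) : List (String × List String) → List (String × Nat)
  | [] => []
  | (_, kws) :: rest => pvBlock k kws ++ pvFlat (k + 1) rest

def pvFirstIdx? (tl : String) : List (String × List String) → Option Nat
  | [] => none
  | (_, kws) :: rest =>
      if kws.any (fun kw => PySem.Str.isIn kw tl) then some 0
      else (pvFirstIdx? tl rest).map (· + 1)

def pvChain (tl : String) : List (String × List String) → String
  | [] => "General Technical"
  | (cat, kws) :: rest =>
      if kws.any (fun kw => PySem.Str.isIn kw tl) then cat else pvChain tl rest

lemma pvBlockFold (tl : String) (kws : List String) (i b : Nat) :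
    List.foldl (pvStep tl) b (pvBlock i kws)
      = if i < b ∧ kws.any (fun kw => PySem.Str.isIn kw tl) = true then i else b := by
  induction kws generalizing b with
  | nil =>
      rw [pvBlock, List.map_nil, List.foldl_nil, if_neg]
      rintro ⟨-, h⟩
      simp at h
  | cons kw rest ih =>
      rw [pvBlock, List.map_cons, List.foldl_cons, ← pvBlock, ih]
      by_cases h2 : PySem.Chars.isIn kw.toList tl.toList = true
      · by_cases h1 : i < b
        · have hs : pvStep tl b (kw, i) = i := by
            simp [pvStep, PySem.Str.isIn, h1, h2]
          rw [hs, if_neg (fun hc => absurd hc.1 (Nat.lt_irrefl i)),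
              if_pos ⟨h1, by simp [List.any_cons, PySem.Str.isIn, h2]⟩]
        · have hs : pvStep tl b (kw, i) = b := by simp [pvStep, h1]
          rw [hs, if_neg (fun hc => h1 hc.1), if_neg (fun hc => h1 hc.1)]
      · have hs : pvStep tl b (kw, i) = b := by
          simp [pvStep, PySem.Str.isIn, h2]
        rw [hs]
        simp only [List.any_cons, PySem.Str.isIn, h2, Bool.false_or]
        rfl

lemma pvFlatFold_ge (tl : String) (table : List (String × List String)) (k b : Nat)
    (h : b ≤ k) : List.foldl (pvStep tl) b (pvFlat k table) = b := by
  induction table generalizing k b with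
  | nil => simp [pvFlat]
  | cons row rest ih =>
      obtain ⟨cat, kws⟩ := row
      rw [pvFlat, List.foldl_append, pvBlockFold,
          if_neg (fun hc => absurd hc.1 (by omega))]
      exact ih (k + 1) b (by omega)

lemma pvFlatFold_main (tl : String) (table : List (String × List String)) (k b : Nat)
    (h : k + table.length ≤ b) :
    List.foldl (pvStep tl) b (pvFlat k table)
      = match pvFirstIdx? tl table with
        | some j => k + j
        | none => b := by
  induction table generalizing k b with
  | nil => simp [pvFlat, pvFirstIdx?]
  | cons row rest ih =>
      obtain ⟨cat, kws⟩ := row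
      rw [pvFlat, List.foldl_append, pvBlockFold]
      have hk : k < b := by
        simp only [List.length_cons] at h; omega
      by_cases hm : kws.any (fun kw => PySem.Str.isIn kw tl) = true
      · rw [if_pos ⟨hk, hm⟩, pvFirstIdx?, if_pos hm]
        simpa using pvFlatFold_ge tl rest (k + 1) k (by omega)
      · rw [if_neg (fun hc => hm hc.2), pvFirstIdx?, if_neg hm,
            ih (k + 1) b (by simp only [List.length_cons] at h; omega)]
        cases hfi : pvFirstIdx? tl rest with
        | none => simp
        | some j =>
            simp only [Option.map_some]
            show k + 1 + j = k + (j + 1)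
            omega

lemma pvChain_firstIdx (tl : String) (table : List (String × List String)) :
    pvChain tl table
      = match pvFirstIdx? tl table with
        | some j => (table.map Prod.fst).getD j "General Technical"
        | none => "General Technical" := by
  induction table with
  | nil => simp [pvChain, pvFirstIdx?]
  | cons row rest ih =>
      obtain ⟨cat, kws⟩ := row
      rw [pvChain, pvFirstIdx?]
      by_cases hm : kws.any (fun kw => PySem.Str.isIn kw tl) = true
      · rw [if_pos hm, if_pos hm]
        simp
      · rw [if_neg hm, if_neg hm, ih]
        cases hfi : pvFirstIdx? tl rest with
        | none => simp
        | some j => simp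

lemma pvFirstIdx_lt (tl : String) (table : List (String × List String)) (j : Nat)
    (h : pvFirstIdx? tl table = some j) : j < table.length := by
  induction table generalizing j with
  | nil => simp [pvFirstIdx?] at h
  | cons row rest ih =>
      obtain ⟨cat, kws⟩ := row
      rw [pvFirstIdx?] at h
      by_cases hm : kws.any (fun kw => PySem.Str.isIn kw tl) = true
      · rw [if_pos hm] at h
        cases h
        simp
      · rw [if_neg hm] at h
        cases hfi : pvFirstIdx? tl rest with
        | none => rw [hfi] at h; simp at h
        | some j' =>
            rw [hfi] at h
            simp only [Option.map_some, Option.some.injEq] at h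
            have := ih j' hfi
            simp only [List.length_cons]
            omega

lemma pvAlt_eq_chain (topic : String) :
    determine_role_category_py_alt topic = pvChain (PySem.Str.lower topic) pvTable := by
  have hflat : pvFlatKeywords = pvFlat 0 pvTable := by rfl
  have hnames : pvCategoryNames = pvTable.map Prod.fst := by rfl
  have hlen : pvCategoryNames.length = pvTable.length := by rfl
  unfold determine_role_category_py_alt
  dsimp only
  rw [hflat, hlen,
      pvFlatFold_main (PySem.Str.lower topic) pvTable 0 pvTable.length (by omega),
      pvChain_firstIdx]
  cases hfi : pvFirstIdx? (PySem.Str.lower topic) pvTable with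
  | none => simp
  | some j =>
      have hj := pvFirstIdx_lt _ _ _ hfi
      simp only [Nat.zero_add, if_pos hj, hnames]

-- ===== VERDICT =====
theorem determine_role_category_py_spec : Claim_equal_determine_role_category_py := by
  intro topic _
  unfold Spec_determine_role_category_py
  rw [pvAlt_eq_chain]
  unfold determine_role_category_py
  simp only [pvTable, pvChain]
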